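-- pv_equiv track=rewrite | github.com/Aryan-Vora/OnlineJudge | 12015/main.py | find_lucky_pages
-- ===== SOURCE A (Python) =====
-- def find_lucky_pages(test_cases):
--     results = []
--     for case_number, pages in enumerate(test_cases, start=1):
--         max_relevance = max(pages, key=lambda x: x[1])[1]
--         lucky_pages = [url for url, relevance in pages if relevance == max_relevance]
--
--         results.append(f"Case #{case_number}:")
--         results.extend(lucky_pages)
--
--     return results
-- ===== SOURCE B (Python) =====
-- def find_lucky_pages(test_cases):
--     def render(k, cases):
--         if not cases:
--             return []
--         pages = cases[0]
--         url0, best = pages[0]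
--         winners = [url0]
--         for url, rel in pages[1:]:
--             if rel > best:
--                 best, winners = rel, [url]
--             elif rel == best:
--                 winners.append(url)
--         return [f"Case #{k}:"] + winners + render(k + 1, cases[1:])
--     return render(1, test_cases)
-- ===== Notes on version B (the rewrite author's own statement) =====
-- stated objective: alternative
-- what changed: Per case, B replaces A's two scans (max-with-key, then a filtering comprehension) by one pass seeded from the first page that keeps a running best relevance and the winners at that best, resetting when a higher relevance appears; the case loop becomes a recursion over the remaining cases.
import Mathlib
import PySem

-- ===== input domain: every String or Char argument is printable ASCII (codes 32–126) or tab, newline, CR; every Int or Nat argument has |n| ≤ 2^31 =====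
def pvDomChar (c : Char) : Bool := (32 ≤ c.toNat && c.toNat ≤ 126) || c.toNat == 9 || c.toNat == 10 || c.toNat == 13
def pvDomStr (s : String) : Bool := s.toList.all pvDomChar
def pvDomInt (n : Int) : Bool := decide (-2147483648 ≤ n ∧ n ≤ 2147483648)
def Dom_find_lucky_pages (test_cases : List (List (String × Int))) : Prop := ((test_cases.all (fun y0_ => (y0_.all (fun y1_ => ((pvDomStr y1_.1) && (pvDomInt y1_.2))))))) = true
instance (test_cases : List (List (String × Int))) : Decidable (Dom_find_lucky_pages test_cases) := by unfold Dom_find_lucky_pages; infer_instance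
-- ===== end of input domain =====

-- B replaces A's two scans per case (max-with-key, then a filtering pass) by ONE pass seeded from
-- the first page, keeping a running best relevance and the winners at that best, and recursing over
-- the cases; equal on inputs with no empty page list (there both Pythons raise).

-- ===== PORT A =====
-- the 'none' branch is Python's ValueError on max([]) — excluded by Pre_
def find_lucky_pages (test_cases : List (List (String × Int))) : List String :=
  (test_cases.foldl (fun (st : List String × Int) pages =>
      let case_number := st.2 + 1
      match PySem.List.max? pages (fun x => x.2) with
      | none => (st.1, case_number)
      | some mx =>
        let max_relevance := mx.2
        let lucky_pages := (pages.filter (fun p => p.2 = max_relevance)).map (fun p => p.1)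
        (st.1 ++ ["Case #" ++ PySem.Int.toStr case_number ++ ":"] ++ lucky_pages, case_number))
    ([], 0)).1

-- ===== PORT B =====
-- one iteration of B's inner loop: state = (best relevance so far, winners at that best)
def pvStep (st : Int × List String) (p : String × Int) : Int × List String :=
  if st.1 < p.2 then (p.2, [p.1])
  else if p.2 = st.1 then (st.1, st.2 ++ [p.1])
  else st

-- B's recursion over the remaining cases ('render(k, cases)');
-- the inner '[]' branch is Python's IndexError on pages[0] — excluded by Pre_
def pvRender (k : Int) : List (List (String × Int)) → List String
  | [] => []
  | pages :: rest =>
    match pages with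
    | [] => []
    | (url0, best0) :: tl =>
      (("Case #" ++ PySem.Int.toStr k ++ ":") :: (tl.foldl pvStep (best0, [url0])).2)
        ++ pvRender (k + 1) rest

def find_lucky_pages_alt (test_cases : List (List (String × Int))) : List String :=
  pvRender 1 test_cases

-- ===== PRECONDITION & SPEC =====
-- Pre_ excludes inputs containing an empty page list: there A raises ValueError (max of an empty
-- sequence) and B raises IndexError (pages[0]).
def Pre_find_lucky_pages (test_cases : List (List (String × Int))) : Prop :=
  ∀ pages ∈ test_cases, pages ≠ []
instance (test_cases : List (List (String × Int))) : Decidable (Pre_find_lucky_pages test_cases) := by unfold Pre_find_lucky_pages; infer_instance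
def pvWitness_find_lucky_pages : (List (List (String × Int))) := [[("a", 1), ("b", 2), ("c", 2)]]

def Spec_find_lucky_pages (test_cases : List (List (String × Int))) (out : List String) : Prop := out = find_lucky_pages_alt test_cases
instance (test_cases : List (List (String × Int))) (out : List String) : Decidable (Spec_find_lucky_pages test_cases out) := by unfold Spec_find_lucky_pages; infer_instance

-- ===== CLAIM (what is proved, stated in full; the proofs are below) =====
def Claim_equal_find_lucky_pages : Prop := ∀ (test_cases : List (List (String × Int))), Dom_find_lucky_pages test_cases → Pre_find_lucky_pages test_cases → Spec_find_lucky_pages test_cases (find_lucky_pages test_cases)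

-- ===== LEMMAS AND PROOFS =====

-- running maximum of the relevances of t, seeded with b
def pvMaxRel (t : List (String × Int)) (b : Int) : Int :=
  t.foldl (fun a p => max a p.2) b

-- the tracker loop: final best is the running max, final winners are us (kept only if nothing in t
-- beat b) followed by the first components of the pages of t achieving the max
lemma scan_spec (t : List (String × Int)) : ∀ (b : Int) (us : List String),
    t.foldl pvStep (b, us) =
      (pvMaxRel t b,
       (if pvMaxRel t b = b then us else [])
         ++ (t.filter (fun p => p.2 = pvMaxRel t b)).map (fun p => p.1)) := by
  induction t with
  | nil => intro b us; simp [pvMaxRel]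
  | cons p t ih =>
    intro b us
    rcases p with ⟨u, r⟩
    by_cases h1 : b < r
    · have hm : pvMaxRel ((u, r) :: t) b = pvMaxRel t r := by
        simp [pvMaxRel]; congr 1; omega
      simp only [List.foldl_cons, pvStep, if_pos h1, ih r [u], hm]
      by_cases h2 : pvMaxRel t r = r
      · have hr := PySem.List.le_foldl_max_int t (fun p => p.2) r
        simp [h2]
        omega
      · have hr := (PySem.List.le_foldl_max_int t (fun p => p.2) r).1
        have : ¬ pvMaxRel t r = b := by unfold pvMaxRel at *; omega
        have hrne : ¬ r = pvMaxRel t r := fun hc => h2 hc.symm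
        simp [h2, this, hrne]
    · by_cases h2 : r = b
      · have hm : pvMaxRel ((u, r) :: t) b = pvMaxRel t b := by
          simp [pvMaxRel]; congr 1; omega
        simp only [List.foldl_cons, pvStep, if_neg h1, if_pos h2, ih b (us ++ [u]), hm]
        by_cases h3 : pvMaxRel t b = b
        · simp [h3, h2]
        · have hr := (PySem.List.le_foldl_max_int t (fun p => p.2) b).1
          have : ¬ r = pvMaxRel t b := by unfold pvMaxRel at *; omega
          simp [h3, this]
      · have hm : pvMaxRel ((u, r) :: t) b = pvMaxRel t b := by
          simp [pvMaxRel]; congr 1; omega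
        simp only [List.foldl_cons, pvStep, if_neg h1, if_neg h2, ih b us, hm]
        have hr := (PySem.List.le_foldl_max_int t (fun p => p.2) b).1
        have : ¬ r = pvMaxRel t b := by unfold pvMaxRel at *; omega
        simp [this]

-- per case: B's one-pass winners equal A's filter of the pages with maximal relevance
lemma case_eq (u : String) (r : Int) (t : List (String × Int)) (mx : String × Int)
    (hA : PySem.List.max? ((u, r) :: t) (fun x => x.2) = some mx) :
    (t.foldl pvStep (r, [u])).2
      = (((u, r) :: t).filter (fun p => p.2 = mx.2)).map (fun p => p.1) := by
  have hmem := PySem.List.max?_mem hA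
  have hmax := PySem.List.max?_isMax hA
  -- the running max equals mx.2
  have hle := PySem.List.le_foldl_max_int t (fun p => p.2) r
  have hmem' : pvMaxRel t r = r ∨ pvMaxRel t r ∈ t.map (fun p => p.2) := by
    have : pvMaxRel t r = (t.map (fun p => p.2)).foldl max r := by
      simp [pvMaxRel, List.foldl_map]
    rw [this]; exact PySem.List.foldl_max_mem _ _
  have hM : pvMaxRel t r = mx.2 := by
    have h1 : mx.2 ≤ pvMaxRel t r := by
      rcases List.mem_cons.1 hmem with h | h
      · rw [h] at *; exact hle.1
      · exact hle.2 mx h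
    have h2 : pvMaxRel t r ≤ mx.2 := by
      rcases hmem' with h | h
      · rw [h]; exact hmax _ (List.mem_cons_self ..)
      · rcases List.mem_map.1 h with ⟨p, hp, hpe⟩
        rw [← hpe]; exact hmax p (List.mem_cons_of_mem _ hp)
    omega
  rw [scan_spec t r [u], hM]
  by_cases h3 : mx.2 = r
  · simp [h3]
  · have : ¬ r = mx.2 := fun hc => h3 hc.symm
    simp [h3, this]

-- A's fold over the cases, started at any accumulator and counter, is B's recursion
lemma fold_eq (tcs : List (List (String × Int))) (hpre : ∀ pages ∈ tcs, pages ≠ []) :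
    ∀ (k : Int) (acc : List String),
    (tcs.foldl (fun (st : List String × Int) pages =>
        let case_number := st.2 + 1
        match PySem.List.max? pages (fun x => x.2) with
        | none => (st.1, case_number)
        | some mx =>
          let max_relevance := mx.2
          let lucky_pages := (pages.filter (fun p => p.2 = max_relevance)).map (fun p => p.1)
          (st.1 ++ ["Case #" ++ PySem.Int.toStr case_number ++ ":"] ++ lucky_pages, case_number))
      (acc, k)).1 = acc ++ pvRender (k + 1) tcs := by
  induction tcs with
  | nil => intro k acc; simp [pvRender]
  | cons pages rest ih =>
    intro k acc
    rcases pages with _ | ⟨⟨u, r⟩, t⟩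
    · exact absurd rfl (hpre [] (List.mem_cons_self ..))
    · obtain ⟨mx, hA⟩ : ∃ mx, PySem.List.max? ((u, r) :: t) (fun x => x.2) = some mx := by
        cases h : PySem.List.max? ((u, r) :: t) (fun x => x.2) with
        | none => simp [PySem.List.max?_eq_none_iff] at h
        | some m => exact ⟨m, rfl⟩
      have ih' := ih (fun p hp => hpre p (List.mem_cons_of_mem _ hp))
      simp only [List.foldl_cons, hA, ih', pvRender, ← case_eq u r t mx hA]
      simp

-- ===== VERDICT (by name: the statement is the Claim_ definition above) =====
theorem find_lucky_pages_spec : Claim_equal_find_lucky_pages := by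
  intro tcs _ hpre
  unfold Spec_find_lucky_pages find_lucky_pages find_lucky_pages_alt
  simpa using fold_eq tcs hpre 0 []
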